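-- pv_equiv track=rewrite | github.com/Microchip-Vectorblox/VectorBlox-SDK | snp_compiler/common/amm_ir.py | get_size_sorted_free_mem_blobs
-- ===== SOURCE A (Python) =====
-- def get_size_sorted_free_mem_blobs(allocated_blocks):
--     found_free_blob=False
--     blob_size=0
--     blob_start_idx=0
--     free_blobs = []
--     for idx,block in enumerate(allocated_blocks):
--         if block == False: # current block not allocated
--             if found_free_blob == True: # Already inside a free blob
--                 blob_size+=1
--             else:
--                 found_free_blob = True # A start of new free mem blob
--                 blob_size=1
--                 blob_start_idx=idx
--         else: # end of free blob or continue of no blob found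
--             if found_free_blob == True: # Already inside a free blob
--                 free_blobs.append((blob_size,blob_start_idx))
--                 found_free_blob = False
--                 blob_size=0
--                 blob_start_idx=0
--     if found_free_blob == True: #We are in middle of free blob and reached end of mem
--         free_blobs.append((blob_size,blob_start_idx))
--     free_blobs.sort()
--     return free_blobs
-- ===== SOURCE B (Python) =====
-- def get_size_sorted_free_mem_blobs(allocated_blocks):
--     # Phase 1: run-length encode the blocks by freeness (block == False).
--     runs = []
--     for block in allocated_blocks:
--         free = (block == False)
--         if runs and runs[-1][0] == free:
--             runs[-1] = (free, runs[-1][1] + 1)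
--         else:
--             runs.append((free, 1))
--     # Phase 2: assign start offsets from cumulative lengths, keep free runs.
--     free_blobs = []
--     offset = 0
--     for free, length in runs:
--         if free:
--             free_blobs.append((length, offset))
--         offset += length
--     free_blobs.sort()
--     return free_blobs
-- ===== Notes on version B (the rewrite author's own statement) =====
-- stated objective: alternative
-- what changed: Replaces the found_free_blob state machine with a two-phase grouping decomposition: run-length encode the blocks by freeness, then a second pass turns cumulative run lengths into (length, start) pairs for the free runs before sorting.
import Mathlib
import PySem

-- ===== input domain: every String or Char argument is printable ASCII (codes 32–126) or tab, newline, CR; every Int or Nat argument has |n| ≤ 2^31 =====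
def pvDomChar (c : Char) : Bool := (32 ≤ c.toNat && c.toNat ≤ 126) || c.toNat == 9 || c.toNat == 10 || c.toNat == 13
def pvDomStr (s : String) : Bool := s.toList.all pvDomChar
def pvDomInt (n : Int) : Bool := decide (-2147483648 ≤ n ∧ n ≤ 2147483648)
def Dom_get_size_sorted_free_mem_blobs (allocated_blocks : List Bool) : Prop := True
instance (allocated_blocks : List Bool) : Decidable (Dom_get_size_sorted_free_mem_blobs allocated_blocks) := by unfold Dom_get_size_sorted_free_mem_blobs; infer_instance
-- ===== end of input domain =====

-- B replaces A's found_free_blob state machine by a two-phase decomposition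
-- (run-length encode by freeness, then turn cumulative lengths into offsets);
-- objective: alternative structure, same cost.

-- ===== PORT A =====
-- loop body of A's `for idx, block in enumerate(...)`; state = (found_free_blob, blob_size, blob_start_idx, free_blobs)
def pvStepA (s : Bool × Int × Int × List (Int × Int)) (ib : Int × Bool) : Bool × Int × Int × List (Int × Int) :=
  if ib.2 == false then
    if s.1 == true then (s.1, s.2.1 + 1, s.2.2.1, s.2.2.2)
    else (true, 1, ib.1, s.2.2.2)
  else
    if s.1 == true then (false, 0, 0, s.2.2.2 ++ [(s.2.1, s.2.2.1)])
    else s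

-- A's post-loop flush of a pending free blob
def pvFinA (s : Bool × Int × Int × List (Int × Int)) : List (Int × Int) :=
  if s.1 == true then s.2.2.2 ++ [(s.2.1, s.2.2.1)] else s.2.2.2

def get_size_sorted_free_mem_blobs (allocated_blocks : List Bool) : List (Int × Int) :=
  PySem.List.sorted2 (pvFinA ((PySem.List.enumerate allocated_blocks).foldl pvStepA (false, 0, 0, [])))
    (fun p => p.1) (fun p => p.2)

-- ===== PORT B =====
-- phase 1 loop body: extend the last run or start a new one
def pvStepRuns (runs : List (Bool × Int)) (block : Bool) : List (Bool × Int) :=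
  let free := block == false
  match runs.getLast? with
  | some last => if last.1 == free then runs.dropLast ++ [(free, last.2 + 1)]
                 else runs ++ [(free, 1)]
  | none => [(free, 1)]

-- phase 2 loop body: state = (free_blobs, offset)
def pvStepOffs (acc : List (Int × Int) × Int) (r : Bool × Int) : List (Int × Int) × Int :=
  ((if r.1 then acc.1 ++ [(r.2, acc.2)] else acc.1), acc.2 + r.2)

def get_size_sorted_free_mem_blobs_alt (allocated_blocks : List Bool) : List (Int × Int) :=
  PySem.List.sorted2 ((allocated_blocks.foldl pvStepRuns []).foldl pvStepOffs ([], 0)).1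
    (fun p => p.1) (fun p => p.2)

-- ===== PRECONDITION & SPEC =====
def Spec_get_size_sorted_free_mem_blobs (allocated_blocks : List Bool) (out : List (Int × Int)) : Prop := out = get_size_sorted_free_mem_blobs_alt allocated_blocks
instance (allocated_blocks : List Bool) (out : List (Int × Int)) : Decidable (Spec_get_size_sorted_free_mem_blobs allocated_blocks out) := by unfold Spec_get_size_sorted_free_mem_blobs; infer_instance

-- ===== CLAIM (what is proved, stated in full; the proofs are below) =====
def Claim_equal_get_size_sorted_free_mem_blobs : Prop := ∀ (allocated_blocks : List Bool), Dom_get_size_sorted_free_mem_blobs allocated_blocks → Spec_get_size_sorted_free_mem_blobs allocated_blocks (get_size_sorted_free_mem_blobs allocated_blocks)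

-- ===== LEMMAS AND PROOFS =====

-- reference run-length encoding: pending run of kind k (free?) and length n, then xs
def pvRle : Bool → Int → List Bool → List (Bool × Int)
  | k, n, [] => [(k, n)]
  | k, n, b :: xs => if k == (b == false) then pvRle k (n + 1) xs else (k, n) :: pvRle (b == false) 1 xs

-- reference offset assignment
def pvOffs : Int → List (Bool × Int) → List (Int × Int)
  | _, [] => []
  | off, r :: rs => if r.1 then (r.2, off) :: pvOffs (off + r.2) rs else pvOffs (off + r.2) rs

-- the blobs of a pending allocated run depend only on the offset where the run ends
theorem pvOffs_rle_false (xs : List Bool) : ∀ (off off' n m : Int), off + n = off' + m →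
    pvOffs off (pvRle false n xs) = pvOffs off' (pvRle false m xs) := by
  induction xs with
  | nil => intro off off' n m h; simp [pvRle, pvOffs]
  | cons b xs ih =>
    intro off off' n m h
    cases b
    · simp only [pvRle]
      norm_num [pvOffs]
      rw [h]
    · simp only [pvRle]
      norm_num
      exact ih _ _ _ _ (by omega)

-- invariant of A's loop: in a free run of length n started at st (first case), or with no
-- pending free run (second case), the flushed result is the pending blobs plus the blobs of
-- the remaining suffix
theorem la (xs : List Bool) : ∀ (i : Int),
    (∀ (n st : Int) (blobs : List (Int × Int)), i = st + n →
      pvFinA ((PySem.List.enumerate xs i).foldl pvStepA (true, n, st, blobs)) = blobs ++ pvOffs st (pvRle true n xs))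
    ∧ (∀ (a c : Int) (blobs : List (Int × Int)),
      pvFinA ((PySem.List.enumerate xs i).foldl pvStepA (false, a, c, blobs)) = blobs ++ pvOffs (i - 1) (pvRle false 1 xs)) := by
  induction xs with
  | nil =>
    intro i
    refine ⟨fun n st blobs _ => ?_, fun a c blobs => ?_⟩
    · simp [PySem.List.enumerate, pvFinA, pvRle, pvOffs]
    · simp [PySem.List.enumerate, pvFinA, pvRle, pvOffs]
  | cons b xs ih =>
    intro i
    refine ⟨fun n st blobs hi => ?_, fun a c blobs => ?_⟩
    · cases b
      · simp only [PySem.List.enumerate_cons, List.foldl_cons, pvStepA, pvRle]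
        norm_num
        exact (ih (i + 1)).1 (n + 1) st blobs (by omega)
      · simp only [PySem.List.enumerate_cons, List.foldl_cons, pvStepA, pvRle]
        norm_num [pvOffs]
        rw [(ih (i + 1)).2 0 0 (blobs ++ [(n, st)])]
        rw [show i + 1 - 1 = st + n from by omega]
        simp
    · cases b
      · simp only [PySem.List.enumerate_cons, List.foldl_cons, pvStepA, pvRle]
        norm_num [pvOffs]
        rw [(ih (i + 1)).1 1 i blobs (by omega)]
      · simp only [PySem.List.enumerate_cons, List.foldl_cons, pvStepA, pvRle]
        norm_num
        rw [(ih (i + 1)).2 a c blobs]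
        rw [pvOffs_rle_false xs (i - 1) (i + 1 - 1) 2 1 (by omega)]

-- invariant of B's phase-1 loop: folding with a pending last run (k, n) yields the reference RLE
theorem lb1 (xs : List Bool) : ∀ (rs : List (Bool × Int)) (k : Bool) (n : Int),
    xs.foldl pvStepRuns (rs ++ [(k, n)]) = rs ++ pvRle k n xs := by
  induction xs with
  | nil => intro rs k n; simp [pvRle]
  | cons b xs ih =>
    intro rs k n
    by_cases hk : (k == (b == false)) = true
    · have hkk : k = (b == false) := eq_of_beq hk
      subst hkk
      simp only [List.foldl_cons, pvStepRuns, List.getLast?_concat, beq_self_eq_true, if_true,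
        List.dropLast_concat, ih, pvRle]
    · have hk' : (k == (b == false)) = false := by revert hk; cases h : (k == (b == false)) <;> simp
      simp only [List.foldl_cons, pvStepRuns, List.getLast?_concat, hk', Bool.false_eq_true,
        if_false, List.append_assoc, List.singleton_append]
      rw [show rs ++ (k, n) :: [(b == false, 1)] = (rs ++ [(k, n)]) ++ [(b == false, 1)] by simp]
      rw [ih ((rs ++ [(k, n)])) (b == false) 1]
      rw [show pvRle k n (b :: xs) = (k, n) :: pvRle (b == false) 1 xs by
        simp only [pvRle, hk', Bool.false_eq_true, if_false]]
      simp

-- invariant of B's phase-2 loop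
theorem lb2 (rs : List (Bool × Int)) : ∀ (fb : List (Int × Int)) (off : Int),
    (rs.foldl pvStepOffs (fb, off)).1 = fb ++ pvOffs off rs := by
  induction rs with
  | nil => intro fb off; simp [pvOffs]
  | cons r rs ih =>
    intro fb off
    by_cases hr : r.1 = true
    · simp [List.foldl_cons, pvStepOffs, hr, pvOffs, ih]
    · simp [List.foldl_cons, pvStepOffs, hr, pvOffs, ih]

-- ===== VERDICT (by name: the statement is the Claim_ definition above) =====
theorem get_size_sorted_free_mem_blobs_spec : Claim_equal_get_size_sorted_free_mem_blobs := by
  intro xs _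
  unfold Spec_get_size_sorted_free_mem_blobs get_size_sorted_free_mem_blobs get_size_sorted_free_mem_blobs_alt
  cases xs with
  | nil => simp [PySem.List.enumerate, pvFinA]
  | cons b xs =>
    have hA : pvFinA ((PySem.List.enumerate (b :: xs) 0).foldl pvStepA (false, 0, 0, [])) =
        pvOffs 0 (pvRle (b == false) 1 xs) := by
      cases b
      · simp only [PySem.List.enumerate_cons, List.foldl_cons, pvStepA]
        norm_num
        have := (la xs 1).1 1 0 [] (by omega)
        simpa using this
      · simp only [PySem.List.enumerate_cons, List.foldl_cons, pvStepA]
        norm_num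
        have := (la xs 1).2 0 0 []
        simpa using this
    have hB : (((b :: xs).foldl pvStepRuns []).foldl pvStepOffs ([], 0)).1 =
        pvOffs 0 (pvRle (b == false) 1 xs) := by
      have h1 : (b :: xs).foldl pvStepRuns [] = pvRle (b == false) 1 xs := by
        have h2 := lb1 xs [] (b == false) 1
        simpa [pvStepRuns] using h2
      rw [h1, lb2]
      simp
    rw [hA, hB]
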